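-- pv_equiv track=rewrite | github.com/aminjahanpour/aes_gcm_python | aes_toolkit.py | zero_pad_bin_list_to_multiples_of_128
-- ===== SOURCE A (Python) =====
-- def zero_pad_bin_list_to_multiples_of_128(input):
--
--     if input == []:
--         data_chunks = [16 * ['00000000']]
--     else:
--         data_chunks = [input[i:i + 16] for i in range(0, len(input), 16)]
--
--         if len(data_chunks[-1]) < 16:
--             data_chunks[-1] = data_chunks[-1] + (16 - len(data_chunks[-1])) * ['00000000']
--
--     return data_chunks
-- ===== SOURCE B (Python) =====
-- def zero_pad_bin_list_to_multiples_of_128(input):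
--     chunks = []
--     cur = []
--     for x in input:
--         cur = cur + [x]
--         if len(cur) == 16:
--             chunks.append(cur)
--             cur = []
--     if cur or not chunks:
--         chunks.append(cur + (16 - len(cur)) * ['00000000'])
--     return chunks
-- ===== Notes on version B (the rewrite author's own statement) =====
-- stated objective: alternative
-- what changed: B makes a single element-wise pass with an accumulator, flushing a chunk every 16 elements and padding the final partial (or empty) chunk at the end, instead of slicing by index ranges and repairing the last slice.
import Mathlib
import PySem

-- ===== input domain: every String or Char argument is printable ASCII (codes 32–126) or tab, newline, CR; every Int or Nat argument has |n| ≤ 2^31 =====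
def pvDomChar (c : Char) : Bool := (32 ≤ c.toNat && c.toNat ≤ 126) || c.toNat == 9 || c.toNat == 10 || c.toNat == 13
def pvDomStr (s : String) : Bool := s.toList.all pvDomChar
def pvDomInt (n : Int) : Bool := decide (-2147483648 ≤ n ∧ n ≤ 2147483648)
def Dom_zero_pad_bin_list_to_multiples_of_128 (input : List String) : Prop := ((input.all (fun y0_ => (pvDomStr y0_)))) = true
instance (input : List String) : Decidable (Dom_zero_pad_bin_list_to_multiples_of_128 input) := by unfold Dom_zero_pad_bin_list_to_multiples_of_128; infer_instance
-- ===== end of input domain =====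

-- B builds the chunks in one element-wise pass with an accumulator (flush every 16,
-- pad the final partial/empty chunk), instead of slicing by index ranges and repairing
-- the last slice (objective: alternative).


-- ===== PORT A =====
def zero_pad_bin_list_to_multiples_of_128 (input : List String) : List (List String) :=
  if input = [] then [List.replicate 16 "00000000"]
  else
    let data_chunks := (PySem.List.pyRange 0 (input.length : Int) 16).map
      (fun i => PySem.List.slice input (some i) (some (i + 16)))
    -- data_chunks[-1]: negative index ported via pyGet?; data_chunks is nonempty here,
    -- so the .getD [] default is never the value Python sees
    let last := (PySem.List.pyGet? data_chunks (-1)).getD []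
    if (last.length : Int) < 16 then
      -- 'data_chunks[-1] = data_chunks[-1] + …' replaces the last element in place
      data_chunks.dropLast ++ [last ++ List.replicate (16 - last.length) "00000000"]
    else data_chunks

-- ===== PORT B =====
-- the loop body of Source B: extend the current chunk, flush it when it reaches 16
def bStep (s : List (List String) × List String) (x : String) : List (List String) × List String :=
  let cur := s.2 ++ [x]
  if cur.length == 16 then (s.1 ++ [cur], []) else (s.1, cur)

def zero_pad_bin_list_to_multiples_of_128_alt (input : List String) : List (List String) :=
  let s := input.foldl bStep ([], [])
  -- 'if cur or not chunks:' — append the padded final chunk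
  if s.2 ≠ [] ∨ s.1 = [] then
    s.1 ++ [s.2 ++ List.replicate (16 - s.2.length) "00000000"]
  else s.1

-- ===== PRECONDITION & SPEC =====
def Spec_zero_pad_bin_list_to_multiples_of_128 (input : List String) (out : List (List String)) : Prop := out = zero_pad_bin_list_to_multiples_of_128_alt input
instance (input : List String) (out : List (List String)) : Decidable (Spec_zero_pad_bin_list_to_multiples_of_128 input out) := by unfold Spec_zero_pad_bin_list_to_multiples_of_128; infer_instance

-- ===== CLAIM (what is proved, stated in full; the proofs are below) =====
def Claim_equal_zero_pad_bin_list_to_multiples_of_128 : Prop := ∀ (input : List String), Dom_zero_pad_bin_list_to_multiples_of_128 input → Spec_zero_pad_bin_list_to_multiples_of_128 input (zero_pad_bin_list_to_multiples_of_128 input)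

-- ===== LEMMAS AND PROOFS =====

-- common recursive shape both ports are reduced to: chunk by 16, pad the last chunk
def padChunks (ys : List String) : List (List String) :=
  if h : ys.length ≤ 16 then [ys ++ List.replicate (16 - ys.length) "00000000"]
  else ys.take 16 :: padChunks (ys.drop 16)
termination_by ys.length
decreasing_by simp [List.length_drop]; omega

-- plain recursive 16-chunking (no padding), the shape of A's comprehension
def chunkRec (ys : List String) : List (List String) :=
  if h : ys = [] then [] else ys.take 16 :: chunkRec (ys.drop 16)
termination_by ys.length
decreasing_by
  have hp : 0 < ys.length := List.length_pos_iff.mpr h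
  simp [List.length_drop]; omega

theorem pyRange16_cons (a b : Int) (h : a < b) :
    PySem.List.pyRange a b 16 = a :: PySem.List.pyRange (a + 16) b 16 := by
  rw [PySem.List.pyRange_of_pos a b (by norm_num), PySem.List.pyRange_of_pos (a+16) b (by norm_num)]
  by_cases h2 : a + 16 < b
  · have hN : ((b - a + 16 - 1) / 16).toNat = ((b - (a+16) + 16 - 1) / 16).toNat + 1 := by
      omega
    simp only [if_pos h, if_pos h2, hN, List.range_succ_eq_map, List.map_cons, List.map_map]
    congr 1
    · norm_num
    · refine List.map_congr_left ?_
      intro k _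
      simp only [Function.comp]
      push_cast
      ring
  · have hN : ((b - a + 16 - 1) / 16).toNat = 1 := by omega
    simp [if_pos h, h2, hN, List.range_succ]

theorem pyRange16_shift (a b : Int) :
    PySem.List.pyRange (a + 16) b 16 =
      (PySem.List.pyRange a (b - 16) 16).map (· + 16) := by
  rw [PySem.List.pyRange_of_pos (a+16) b (by norm_num), PySem.List.pyRange_of_pos a (b-16) (by norm_num)]
  have hN : (if a + 16 < b then ((b - (a + 16) + 16 - 1) / 16).toNat else 0)
      = (if a < b - 16 then ((b - 16 - a + 16 - 1) / 16).toNat else 0) := by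
    split_ifs <;> omega
  rw [hN, List.map_map]
  refine List.map_congr_left ?_
  intro k _
  simp only [Function.comp]
  ring

theorem sliceShift (ys : List String) (j : Int) (hj : 0 ≤ j) :
    PySem.List.slice ys (some (j + 16)) (some (j + 16 + 16)) =
      PySem.List.slice (ys.drop 16) (some j) (some (j + 16)) := by
  rw [PySem.List.slice_toNat ys (by omega) (by omega),
      PySem.List.slice_toNat (ys.drop 16) hj (by omega)]
  rw [List.drop_drop]
  have h1 : (j + 16).toNat = j.toNat + 16 := by omega
  rw [h1]
  have h2 : (j + 16 + 16).toNat - (j.toNat + 16) = 16 := by omega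
  have h3 : j.toNat + 16 - j.toNat = 16 := by omega
  rw [h2, h3, Nat.add_comm]

theorem headSlice (ys : List String) :
    PySem.List.slice ys (some 0) (some (0 + 16)) = ys.take 16 := by
  rw [show ((0:Int) + 16) = ((16:Nat) : Int) by norm_num]
  rw [PySem.List.slice_zero_start, PySem.List.slice_to_natCast]

theorem master (k : Nat) : ∀ (ys : List String), ys.length ≤ k →
    (PySem.List.pyRange 0 (ys.length : Int) 16).map
      (fun i => PySem.List.slice ys (some i) (some (i + 16))) = chunkRec ys := by
  induction k with
  | zero =>
    intro ys hy
    have : ys = [] := List.eq_nil_of_length_eq_zero (by omega)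
    subst this
    rw [chunkRec]
    simp [PySem.List.pyRange_of_pos 0 0 (by norm_num : (0:Int) < 16)]
  | succ k ih =>
    intro ys hy
    by_cases h : ys = []
    · subst h
      rw [chunkRec]
      simp [PySem.List.pyRange_of_pos 0 0 (by norm_num : (0:Int) < 16)]
    · have hn : 0 < ys.length := List.length_pos_iff.mpr h
      rw [pyRange16_cons 0 (ys.length : Int) (by exact_mod_cast hn)]
      rw [pyRange16_shift 0 (ys.length : Int)]
      rw [List.map_cons, List.map_map]
      rw [chunkRec]; rw [dif_neg h]
      congr 1
      · exact headSlice ys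
      · rw [← ih (ys.drop 16) (by simp [List.length_drop]; omega)]
        by_cases h16 : 16 ≤ ys.length
        · have hd : ((ys.drop 16).length : Int) = (ys.length : Int) - 16 := by
            simp [List.length_drop]; omega
          rw [hd]
          refine List.map_congr_left ?_
          intro j hj
          have hj0 : 0 ≤ j := by
            have := (PySem.List.mem_pyRange_iff_of_pos (by norm_num : (0:Int) < 16) j).mp
              (by simpa using hj)
            omega
          simp only [Function.comp_apply]
          exact sliceShift ys j hj0
        · have e1 : PySem.List.pyRange 0 ((ys.length : Int) - 16) 16 = [] := by
            rw [PySem.List.pyRange_of_pos _ _ (by norm_num : (0:Int) < 16)]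
            rw [if_neg (by omega)]
            simp
          have e2 : ys.drop 16 = [] := by
            apply List.eq_nil_of_length_eq_zero; simp [List.length_drop]; omega
          rw [e1, e2]
          simp [PySem.List.pyRange_of_pos 0 0 (by norm_num : (0:Int) < 16)]

-- A's in-place repair of the last chunk, as a function of the chunk list
def fixA (dc : List (List String)) : List (List String) :=
  let last := (PySem.List.pyGet? dc (-1)).getD []
  if (last.length : Int) < 16 then
    dc.dropLast ++ [last ++ List.replicate (16 - last.length) "00000000"]
  else dc

theorem chunkRec_ne_nil (ys : List String) (h : ys ≠ []) : chunkRec ys ≠ [] := by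
  rw [chunkRec]; simp [h]

theorem fixA_cons (c : List String) (dc : List (List String)) (h : dc ≠ []) :
    fixA (c :: dc) = c :: fixA dc := by
  obtain ⟨d, ds, rfl⟩ : ∃ d ds, dc = d :: ds := by
    cases dc with
    | nil => exact absurd rfl h
    | cons d ds => exact ⟨d, ds, rfl⟩
  simp only [fixA, PySem.List.pyGet?_neg_one, List.getLast?_cons_cons,
    List.dropLast_cons₂]
  split <;> simp

-- A (nonempty case) equals padChunks
theorem fixA_chunkRec (k : Nat) : ∀ (ys : List String), ys.length ≤ k → ys ≠ [] →
    fixA (chunkRec ys) = padChunks ys := by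
  induction k with
  | zero =>
    intro ys hy h
    exact absurd (List.eq_nil_of_length_eq_zero (by omega)) h
  | succ k ih =>
    intro ys hy h
    by_cases h16 : ys.length ≤ 16
    · have e2 : ys.drop 16 = [] := by
        apply List.eq_nil_of_length_eq_zero; simp [List.length_drop]; omega
      have e1 : chunkRec ys = [ys] := by
        rw [chunkRec, dif_neg h, e2, chunkRec]
        simp [List.take_of_length_le h16]
      rw [e1, padChunks, dif_pos h16]
      by_cases heq : ys.length = 16
      · simp only [fixA, PySem.List.pyGet?_neg_one, List.getLast?_singleton,
          Option.getD_some]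
        rw [if_neg (by omega), heq]
        simp
      · simp only [fixA, PySem.List.pyGet?_neg_one, List.getLast?_singleton,
          Option.getD_some]
        rw [if_pos (by exact_mod_cast (by omega : ys.length < 16))]
        simp
    · have hdne : ys.drop 16 ≠ [] := by
        simp [← List.length_pos_iff, List.length_drop]; omega
      rw [chunkRec, dif_neg h]
      rw [fixA_cons _ _ (chunkRec_ne_nil _ hdne)]
      rw [padChunks, dif_neg h16]
      congr 1
      exact ih (ys.drop 16) (by simp [List.length_drop]; omega) hdne

-- B's final padding step, as a function of the fold state
def bFin (s : List (List String) × List String) : List (List String) :=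
  if s.2 ≠ [] ∨ s.1 = [] then
    s.1 ++ [s.2 ++ List.replicate (16 - s.2.length) "00000000"]
  else s.1

theorem foldl_bStep_shift (rest : List String) : ∀ (chunks : List (List String)) (cur : List String),
    List.foldl bStep (chunks, cur) rest =
      (chunks ++ (List.foldl bStep ([], cur) rest).1, (List.foldl bStep ([], cur) rest).2) := by
  induction rest with
  | nil => intro chunks cur; simp
  | cons x rest ih =>
    intro chunks cur
    simp only [List.foldl_cons, bStep]
    by_cases h : (cur ++ [x]).length == 16
    · simp only [if_pos h, List.nil_append]
      rw [ih (chunks ++ [cur ++ [x]]) [], ih [cur ++ [x]] []]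
      simp
    · simp only [if_neg h]
      exact ih chunks (cur ++ [x])

theorem bStep_ne_nilnil (s : List (List String) × List String) (x : String) :
    bStep s x ≠ ([], []) := by
  simp only [bStep]
  split
  · simp
  · intro hc
    have := congrArg Prod.snd hc
    simp at this

theorem foldl_bStep_ne_nilnil (rest : List String) (h : rest ≠ []) :
    ∀ s, List.foldl bStep s rest ≠ ([], []) := by
  induction rest with
  | nil => exact absurd rfl h
  | cons x rest ih =>
    intro s
    by_cases hr : rest = []
    · subst hr; simpa using bStep_ne_nilnil s x
    · simpa using ih hr (bStep s x)

theorem bMain (rest : List String) : ∀ (cur : List String), cur.length < 16 →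
    bFin (List.foldl bStep ([], cur) rest) = padChunks (cur ++ rest) := by
  induction rest with
  | nil =>
    intro cur hcur
    rw [show cur ++ ([] : List String) = cur by simp, padChunks, dif_pos (by omega)]
    simp [bFin]
  | cons x rest ih =>
    intro cur hcur
    simp only [List.foldl_cons, bStep]
    by_cases h16 : (cur ++ [x]).length = 16
    · rw [if_pos (by simpa using h16), List.nil_append]
      by_cases hr : rest = []
      · subst hr
        simp only [List.foldl_nil, bFin]
        rw [if_neg (by simp)]
        rw [padChunks, dif_pos (by omega)]
        simp [h16]
      · rw [foldl_bStep_shift rest [cur ++ [x]] []]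
        have hstate := foldl_bStep_ne_nilnil rest hr ([], [])
        set s' := List.foldl bStep ([], ([] : List String)) rest with hs'
        have hBfin : bFin ([cur ++ [x]] ++ s'.1, s'.2) = (cur ++ [x]) :: bFin s' := by
          simp only [bFin]
          by_cases h2 : s'.2 = []
          · have h1 : s'.1 ≠ [] := by
              intro h1
              exact hstate (Prod.ext h1 h2)
            rw [if_neg (by simp [h2, h1]), if_neg (by simp [h2, h1])]
            simp
          · rw [if_pos (Or.inl h2), if_pos (Or.inl h2)]
            simp
        rw [hBfin, ih [] (by simp), List.nil_append]
        have hcx : cur.length + 1 = 16 := by simpa using h16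
        have hrl : 0 < rest.length := List.length_pos_iff.mpr hr
        have hgt : ¬ ((cur ++ x :: rest).length ≤ 16) := by simp; omega
        conv_rhs => rw [padChunks, dif_neg hgt]
        congr 1
        · rw [show cur ++ x :: rest = (cur ++ [x]) ++ rest by simp,
              List.take_append_of_le_length (by omega), List.take_of_length_le (by omega)]
        · congr 1
          rw [show cur ++ x :: rest = (cur ++ [x]) ++ rest by simp,
              List.drop_append_of_le_length (by omega)]
          simp [show (cur ++ [x]).length = 16 from h16]
    · rw [if_neg (by simpa using h16)]
      rw [ih (cur ++ [x]) (by simp at h16 ⊢; omega)]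
      congr 1
      simp

-- ===== VERDICT (by name: the statement is the Claim_ definition above) =====
theorem zero_pad_bin_list_to_multiples_of_128_spec : Claim_equal_zero_pad_bin_list_to_multiples_of_128 := by
  intro input _
  unfold Spec_zero_pad_bin_list_to_multiples_of_128
  have hB : zero_pad_bin_list_to_multiples_of_128_alt input = padChunks input := by
    have := bMain input [] (by simp)
    simpa [zero_pad_bin_list_to_multiples_of_128_alt, bFin] using this
  rw [hB]
  unfold zero_pad_bin_list_to_multiples_of_128
  by_cases h : input = []
  · subst h
    rw [padChunks]
    simp
  · simp only [h, if_false]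
    rw [master input.length input le_rfl]
    have := fixA_chunkRec input.length input le_rfl h
    simpa [fixA] using this
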